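-- pv_equiv track=rewrite | github.com/binaryinferno/binaryinferno | binaryinferno/rep_finding/Rules.py | xvl
-- ===== SOURCE A (Python) =====
-- def leadingZerosCheck(zs,w=1,t=0):
--
--     for xs in zs:
--         if len(xs)<w:
--             return False
--         try:
--             # we do this to handle multple byte fields
--
--             for x in xs[:w]:
--                 if x !=0:
--                     return False
--         except:
--             return False
--     else:
--         return True
--
-- def leadingOnesCheck(zs):
--
--     for xs in zs:
--         try:
--             if xs[0]!=1:
--                 return False
--         except:
--             return False
--     else:
--         return True
--
-- def xvl(zs):
--     new_zs = []
--     if len(zs)>1: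
--         if leadingZerosCheck(zs):
--             return None
--         if leadingOnesCheck(zs):
--             return None
--     for xs in zs:
--         if len(xs)<=1:
--             return None
--         h,*t = xs
--         if h > len(t):
--             return None
--         new_zs.append(t[h:])
--     return new_zs
-- ===== SOURCE B (Python) =====
-- def xvl(zs):
--     new_zs = []
--     all_zero = True
--     all_one = True
--     for xs in zs:
--         if not xs or xs[0] != 0:
--             all_zero = False
--         if not xs or xs[0] != 1:
--             all_one = False
--         if len(xs) <= 1:
--             return None
--         h, *t = xs
--         if h > len(t):
--             return None
--         new_zs.append(t[h:])
--     if len(zs) > 1 and (all_zero or all_one):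
--         return None
--     return new_zs
-- ===== Notes on version B (the rewrite author's own statement) =====
-- stated objective: simpler
-- what changed: B makes a single pass over zs, maintaining all_zero/all_one flags while slicing, instead of A's three separate traversals (two header-check helpers plus the slice loop); the header rejection is decided after the loop.
import Mathlib
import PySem

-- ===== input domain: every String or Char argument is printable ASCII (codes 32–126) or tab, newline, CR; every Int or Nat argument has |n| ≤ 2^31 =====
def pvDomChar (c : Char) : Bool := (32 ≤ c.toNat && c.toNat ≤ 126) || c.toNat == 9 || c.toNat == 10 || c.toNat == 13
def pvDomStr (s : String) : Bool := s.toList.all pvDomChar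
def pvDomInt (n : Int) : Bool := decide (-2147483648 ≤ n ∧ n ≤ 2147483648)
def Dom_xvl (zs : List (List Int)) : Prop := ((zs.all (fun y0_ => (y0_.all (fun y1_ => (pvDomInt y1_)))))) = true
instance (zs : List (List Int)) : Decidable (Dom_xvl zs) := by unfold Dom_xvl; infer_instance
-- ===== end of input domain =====

-- B replaces A's three traversals (two header-check helpers plus the slice loop) with one pass
-- keeping all_zero/all_one flags; same return value everywhere (objective: simpler).

-- ===== PORT A =====
-- leadingZerosCheck with the default w=1, t=0 (xvl calls it with defaults); the inner
-- 'for x in xs[:w]' loop over the slice is the List.all over PySem.List.slice (it cannot raise,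
-- so the 'except' branch is dead); early 'return False' = the fold short-circuiting below.
def leadingZerosCheck : List (List Int) → Bool
  | [] => true
  | xs :: rest =>
      if xs.length < 1 then false
      else if (PySem.List.slice xs (some 0) (some 1)).all (fun x => x == 0) then
        leadingZerosCheck rest
      else false

-- leadingOnesCheck: xs[0] raises IndexError on empty xs, caught by 'except' → False.
def leadingOnesCheck : List (List Int) → Bool
  | [] => true
  | xs :: rest =>
      match PySem.List.pyGet? xs 0 with
      | none => false
      | some v => if v ≠ 1 then false else leadingOnesCheck rest

-- the 'for xs in zs' loop building new_zs
def xvlLoop : List (List Int) → List (List Int) → Option (List (List Int))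
  | [], acc => some acc
  | xs :: rest, acc =>
      if xs.length ≤ 1 then none
      else
        match xs with
        | [] => none  -- unreachable: length ≤ 1 caught above
        | h :: t =>
            if h > (t.length : Int) then none
            else xvlLoop rest (acc ++ [PySem.List.slice t (some h) none])

def xvl (zs : List (List Int)) : Option (List (List Int)) :=
  if zs.length > 1 then
    if leadingZerosCheck zs then none
    else if leadingOnesCheck zs then none
    else xvlLoop zs []
  else xvlLoop zs []

-- ===== PORT B =====
-- single pass: carry (all_zero, all_one, new_zs); returns none on a bad slice, otherwise
-- the final flags and accumulator.
def xvlAltLoop : List (List Int) → Bool → Bool → List (List Int) →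
    Option (Bool × Bool × List (List Int))
  | [], az, ao, acc => some (az, ao, acc)
  | xs :: rest, az, ao, acc =>
      let az := az && (match xs with | [] => false | x0 :: _ => x0 == 0)
      let ao := ao && (match xs with | [] => false | x0 :: _ => x0 == 1)
      if xs.length ≤ 1 then none
      else
        match xs with
        | [] => none  -- unreachable
        | h :: t =>
            if h > (t.length : Int) then none
            else xvlAltLoop rest az ao (acc ++ [PySem.List.slice t (some h) none])

def xvl_alt (zs : List (List Int)) : Option (List (List Int)) :=
  match xvlAltLoop zs true true [] with
  | none => none
  | some (az, ao, acc) =>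
      if zs.length > 1 && (az || ao) then none else some acc

-- ===== PRECONDITION & SPEC =====
def Spec_xvl (zs : List (List Int)) (out : Option (List (List Int))) : Prop := out = xvl_alt zs
instance (zs : List (List Int)) (out : Option (List (List Int))) : Decidable (Spec_xvl zs out) := by unfold Spec_xvl; infer_instance

-- ===== CLAIM (what is proved, stated in full; the proofs are below) =====
def Claim_equal_xvl : Prop := ∀ (zs : List (List Int)), Dom_xvl zs → Spec_xvl zs (xvl zs)

-- ===== LEMMAS AND PROOFS =====

-- per-element predicates the two header checks compute
def zeroHead : List Int → Bool | [] => false | x0 :: _ => x0 == 0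
def oneHead : List Int → Bool | [] => false | x0 :: _ => x0 == 1

lemma leadingZerosCheck_eq_all (zs : List (List Int)) :
    leadingZerosCheck zs = zs.all zeroHead := by
  induction zs with
  | nil => rfl
  | cons xs rest ih =>
      cases xs with
      | nil => simp [leadingZerosCheck, zeroHead]
      | cons x0 t =>
          have hs : PySem.List.slice (x0 :: t) (some 0) (some 1) = [x0] := by
            rw [PySem.List.slice_zero_start]
            simpa using PySem.List.slice_to_natCast (xs := x0 :: t) (b := 1)
          simp only [leadingZerosCheck, ih]
          rw [if_neg (by simp), hs]
          by_cases h0 : x0 = 0 <;> simp [zeroHead, h0]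

lemma leadingOnesCheck_eq_all (zs : List (List Int)) :
    leadingOnesCheck zs = zs.all oneHead := by
  induction zs with
  | nil => rfl
  | cons xs rest ih =>
      cases xs with
      | nil => simp [leadingOnesCheck, oneHead, PySem.List.pyGet?]
      | cons x0 t =>
          have hg : PySem.List.pyGet? (x0 :: t) 0 = some x0 := by
            simp [PySem.List.pyGet?, PySem.List.pyIdx?]
          by_cases h1 : x0 = 1 <;>
            simp [leadingOnesCheck, oneHead, h1, ih, PySem.List.pyGet?, PySem.List.pyIdx?]

-- B's loop = A's loop together with the two flag folds
lemma xvlAltLoop_eq (zs : List (List Int)) :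
    ∀ (az ao : Bool) (acc : List (List Int)),
      xvlAltLoop zs az ao acc =
        (xvlLoop zs acc).map (fun r => (az && zs.all zeroHead, ao && zs.all oneHead, r)) := by
  induction zs with
  | nil => intro az ao acc; simp [xvlAltLoop, xvlLoop]
  | cons xs rest ih =>
      intro az ao acc
      cases xs with
      | nil => simp [xvlAltLoop, xvlLoop]
      | cons h t =>
          by_cases hlen : (h :: t).length ≤ 1
          · have ht : t = [] := by cases t <;> simp_all
            simp [xvlAltLoop, xvlLoop, ht]
          · by_cases hh : h > (t.length : Int)
            · simp [xvlAltLoop, xvlLoop, hh]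
            · simp only [xvlAltLoop, xvlLoop, if_neg hlen, if_neg hh, ih,
                List.all_cons, zeroHead, oneHead]
              cases xvlLoop rest (acc ++ [PySem.List.slice t (some h) none]) <;>
                simp [Bool.and_assoc]

theorem xvl_spec_aux (zs : List (List Int)) : xvl zs = xvl_alt zs := by
  unfold xvl xvl_alt
  rw [xvlAltLoop_eq zs true true [], leadingZerosCheck_eq_all, leadingOnesCheck_eq_all]
  by_cases hlen : zs.length > 1
  · by_cases hz : zs.all zeroHead
    · -- all headers 0: A returns none; B's loop either dies or the flag check kills it
      simp only [if_pos hlen, if_pos hz]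
      cases hL : xvlLoop zs [] with
      | none => simp
      | some r => simp [hlen, hz]
    · by_cases ho : zs.all oneHead
      · simp only [if_pos hlen, if_neg hz, if_pos ho]
        cases hL : xvlLoop zs [] with
        | none => simp
        | some r => simp [hlen, ho]
      · simp only [if_pos hlen, if_neg hz, if_neg ho]
        cases xvlLoop zs [] <;> simp [hz, ho]
  · simp only [if_neg hlen]
    cases xvlLoop zs [] <;> simp [hlen]

-- ===== VERDICT (by name: the statement is the Claim_ definition above) =====
theorem xvl_spec : Claim_equal_xvl := by
  intro zs _
  unfold Spec_xvl
  exact xvl_spec_aux zs
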